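-- pv_equiv track=rewrite | github.com/Rudra2018/ai-job-autopilot | extensions/ocr_job_parser.py | parse_job_details
-- ===== SOURCE A (Python) =====
-- def parse_job_details(ocr_text):
--     lines = ocr_text.splitlines()
--     title = next((l for l in lines if "engineer" in l.lower()), "Unknown")
--     location = next((l for l in lines if "remote" in l.lower() or "berlin" in l.lower()), "Unknown")
--     return {
--         "title": title.strip(),
--         "company": "From Screenshot",
--         "location": location.strip(),
--         "description": ocr_text,
--         "link": "screenshot_job"
--     }
-- ===== SOURCE B (Python) =====
-- def parse_job_details(ocr_text):
--     title = None
--     location = None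
--     for l in ocr_text.splitlines():
--         low = l.lower()
--         if title is None and "engineer" in low:
--             title = l
--         if location is None and ("remote" in low or "berlin" in low):
--             location = l
--         if title is not None and location is not None:
--             break
--     if title is None:
--         title = "Unknown"
--     if location is None:
--         location = "Unknown"
--     return {
--         "title": title.strip(),
--         "company": "From Screenshot",
--         "location": location.strip(),
--         "description": ocr_text,
--         "link": "screenshot_job"
--     }
-- ===== Notes on version B (the rewrite author's own statement) =====
-- stated objective: alternative
-- what changed: Replaces the two independent next()-over-generator scans of the line list with a single explicit loop that carries title/location as None sentinels and breaks as soon as both are found.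
import Mathlib
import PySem

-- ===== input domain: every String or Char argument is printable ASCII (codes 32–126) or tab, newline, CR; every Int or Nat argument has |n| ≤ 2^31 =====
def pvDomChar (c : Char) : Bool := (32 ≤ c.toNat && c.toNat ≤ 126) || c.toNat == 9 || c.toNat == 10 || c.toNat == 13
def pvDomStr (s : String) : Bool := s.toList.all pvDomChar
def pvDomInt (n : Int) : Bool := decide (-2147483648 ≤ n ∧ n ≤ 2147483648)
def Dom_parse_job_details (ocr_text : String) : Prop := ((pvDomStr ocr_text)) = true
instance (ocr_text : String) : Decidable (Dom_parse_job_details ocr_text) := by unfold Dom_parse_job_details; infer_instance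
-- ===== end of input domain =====

-- B replaces A's two separate next()-based scans with one explicit loop carrying
-- None-sentinels for title and location that breaks once both are found (alternative decomposition, same cost).


-- ===== PORT A =====
-- shared predicates: the membership tests both Pythons spell out inline
def pjdTitleHit (l : String) : Bool := PySem.Str.isIn "engineer" (PySem.Str.lower l)
def pjdLocHit (l : String) : Bool :=
  PySem.Str.isIn "remote" (PySem.Str.lower l) || PySem.Str.isIn "berlin" (PySem.Str.lower l)

def parse_job_details (ocr_text : String) : List (String × String) :=
  let lines := PySem.Str.splitlines ocr_text
  let title := (lines.find? (fun l => pjdTitleHit l)).getD "Unknown"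
  let location := (lines.find? (fun l => pjdLocHit l)).getD "Unknown"
  [("title", PySem.Str.strip title),
   ("company", "From Screenshot"),
   ("location", PySem.Str.strip location),
   ("description", ocr_text),
   ("link", "screenshot_job")]

-- ===== PORT B =====
-- the single loop with sentinels and early break
def pjdScan : List String → Option String → Option String → Option String × Option String
  | [], t, loc => (t, loc)
  | l :: rest, t, loc =>
    let t' := if t.isNone && pjdTitleHit l then some l else t
    let loc' := if loc.isNone && pjdLocHit l then some l else loc
    if t'.isSome && loc'.isSome then (t', loc') else pjdScan rest t' loc'

def parse_job_details_alt (ocr_text : String) : List (String × String) :=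
  let (t, loc) := pjdScan (PySem.Str.splitlines ocr_text) none none
  let title := t.getD "Unknown"
  let location := loc.getD "Unknown"
  [("title", PySem.Str.strip title),
   ("company", "From Screenshot"),
   ("location", PySem.Str.strip location),
   ("description", ocr_text),
   ("link", "screenshot_job")]

-- ===== PRECONDITION & SPEC =====
def Spec_parse_job_details (ocr_text : String) (out : List (String × String)) : Prop := out = parse_job_details_alt ocr_text
instance (ocr_text : String) (out : List (String × String)) : Decidable (Spec_parse_job_details ocr_text out) := by unfold Spec_parse_job_details; infer_instance

-- ===== CLAIM (what is proved, stated in full; the proofs are below) =====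
def Claim_equal_parse_job_details : Prop := ∀ (ocr_text : String), Dom_parse_job_details ocr_text → Spec_parse_job_details ocr_text (parse_job_details ocr_text)

-- ===== LEMMAS AND PROOFS =====
theorem pjdScan_eq (lines : List String) (t loc : Option String) :
    pjdScan lines t loc =
      (t.or (lines.find? (fun l => pjdTitleHit l)), loc.or (lines.find? (fun l => pjdLocHit l))) := by
  induction lines generalizing t loc with
  | nil => simp [pjdScan]
  | cons l rest ih =>
    simp only [pjdScan, List.find?_cons]
    cases t <;> cases loc <;>
      cases hT : pjdTitleHit l <;> cases hL : pjdLocHit l <;>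
      simp [ih, hT, hL, Option.or]

-- ===== VERDICT (by name: the statement is the Claim_ definition above) =====
theorem parse_job_details_spec : Claim_equal_parse_job_details := by
  intro ocr_text _
  unfold Spec_parse_job_details parse_job_details parse_job_details_alt
  simp [pjdScan_eq]
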